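-- pv_equiv track=rewrite | github.com/Alessandro727/DreamAnalyzer | emotions.py | takeLastGroup
-- ===== SOURCE A (Python) =====
-- def takeLastGroup(lista):
-- 	split_list = []
-- 	for i in range(len(lista)):
-- 		if 'we ' in lista[i].lower() or 'us ' in lista[i].lower() or 'they ' in lista[i].lower():
-- 			split_list = lista[:i]
-- 	if split_list != []:
-- 		for k in reversed(split_list):
-- 			if '2' in k:
-- 				lista.remove(lista[i])
-- 				return k
-- 	return '2ISA'
-- ===== SOURCE B (Python) =====
-- def takeLastGroup(lista):
--     # Scan backwards for the last pronoun-marked line, slice once, then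
--     # scan that prefix backwards for a line containing '2'.
--     for j in range(len(lista) - 1, -1, -1):
--         low = lista[j].lower()
--         if 'we ' in low or 'us ' in low or 'they ' in low:
--             for k in reversed(lista[:j]):
--                 if '2' in k:
--                     return k
--             return '2ISA'
--     return '2ISA'
-- ===== Notes on version B (the rewrite author's own statement) =====
-- stated objective: alternative
-- what changed: B replaces A's full forward loop that re-slices the list at every pronoun match with one reverse scan that stops at the last matching index and slices exactly once; unlike A, B does not mutate lista (A removes its last element before returning a match, which never affects the return value).
import Mathlib
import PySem

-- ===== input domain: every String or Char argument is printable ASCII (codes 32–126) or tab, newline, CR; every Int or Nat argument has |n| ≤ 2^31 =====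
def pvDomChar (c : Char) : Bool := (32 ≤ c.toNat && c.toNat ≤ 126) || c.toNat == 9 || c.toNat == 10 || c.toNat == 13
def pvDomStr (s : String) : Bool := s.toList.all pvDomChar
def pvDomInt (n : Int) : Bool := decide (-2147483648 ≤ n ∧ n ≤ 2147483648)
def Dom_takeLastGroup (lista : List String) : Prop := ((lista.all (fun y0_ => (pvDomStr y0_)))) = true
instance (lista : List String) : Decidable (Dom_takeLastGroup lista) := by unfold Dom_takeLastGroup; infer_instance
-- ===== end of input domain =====

-- B finds the last pronoun-marked index by ONE reverse scan and slices once (A re-slices at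
-- every match). Equivalence proved is about the RETURN value only: A removes lista's last
-- element in place before returning a '2'-string; B performs no mutation.

-- ===== PORT A =====
-- 'we ' in x.lower() or 'us ' in x.lower() or 'they ' in x.lower()
def pvHit (x : String) : Bool :=
  PySem.Str.isIn "we " (PySem.Str.lower x) || PySem.Str.isIn "us " (PySem.Str.lower x) ||
    PySem.Str.isIn "they " (PySem.Str.lower x)

-- the body of A's 'for i in range(len(lista))' loop
def pvStep (lista : List String) (acc : List String) (i : Int) : List String :=
  if pvHit (PySem.List.pyGetD lista i "") then PySem.List.slice lista none (some i) else acc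

def takeLastGroup (lista : List String) : String :=
  let split_list :=
    (PySem.List.pyRange 0 (PySem.List.len lista) 1).foldl (pvStep lista) []
  if split_list ≠ [] then
    -- 'for k in reversed(split_list): if '2' in k: return k'
    match split_list.reverse.find? (fun k => PySem.Str.isIn "2" k) with
    | some k => k
    | none => "2ISA"
  else "2ISA"

-- ===== PORT B =====
-- Source B's 'for j in range(len(lista)-1, -1, -1)' loop, counting down; n is j+1
def pvBack (lista : List String) : Nat → String
  | 0 => "2ISA"
  | n + 1 =>
    if pvHit (PySem.List.pyGetD lista (n : Int) "") then
      match (PySem.List.slice lista none (some (n : Int))).reverse.find?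
          (fun k => PySem.Str.isIn "2" k) with
      | some k => k
      | none => "2ISA"
    else pvBack lista n

def takeLastGroup_alt (lista : List String) : String := pvBack lista lista.length

-- ===== PRECONDITION & SPEC =====
def Spec_takeLastGroup (lista : List String) (out : String) : Prop := out = takeLastGroup_alt lista
instance (lista : List String) (out : String) : Decidable (Spec_takeLastGroup lista out) := by unfold Spec_takeLastGroup; infer_instance

-- ===== CLAIM (what is proved, stated in full; the proofs are below) =====
def Claim_equal_takeLastGroup : Prop := ∀ (lista : List String), Dom_takeLastGroup lista → Spec_takeLastGroup lista (takeLastGroup lista)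

-- ===== LEMMAS AND PROOFS =====

-- A's post-processing of the final split_list (proof helper)
def pvPost (s : List String) : String :=
  if s ≠ [] then
    match s.reverse.find? (fun k => PySem.Str.isIn "2" k) with
    | some k => k
    | none => "2ISA"
  else "2ISA"

-- A's fold over the first n indices, post-processed, equals B's countdown from n.
lemma pvFold_eq_back (lista : List String) (n : Nat) :
    pvPost ((PySem.List.pyRange 0 (n : Int) 1).foldl (pvStep lista) []) = pvBack lista n := by
  induction n with
  | zero => simp [PySem.List.pyRange_one_eq_nil, pvBack, pvPost]
  | succ m ih =>
    have hc : ((m + 1 : Nat) : Int) = (m : Int) + 1 := by push_cast; ring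
    rw [hc, PySem.List.pyRange_one_succ_right (Int.natCast_nonneg m), List.foldl_append,
      List.foldl_cons, List.foldl_nil]
    by_cases h : pvHit (PySem.List.pyGetD lista (m : Int) "") = true
    · simp only [pvStep, pvBack, h, if_true]
      unfold pvPost
      by_cases hs : PySem.List.slice lista none (some (m : Int)) = []
      · rw [hs]; simp
      · rw [if_pos hs]
    · simp only [pvStep, pvBack, h]
      exact ih

theorem pv_main (lista : List String) : takeLastGroup lista = takeLastGroup_alt lista := by
  have h := pvFold_eq_back lista lista.length
  unfold takeLastGroup takeLastGroup_alt
  show pvPost _ = _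
  simpa [PySem.List.len] using h

-- ===== VERDICT (by name: the statement is the Claim_ definition above) =====
theorem takeLastGroup_spec : Claim_equal_takeLastGroup := by
  intro lista _
  unfold Spec_takeLastGroup
  exact pv_main lista
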